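-- pv_equiv track=rewrite | github.com/maojanlin/IGLoo | analyze_pacbio.py | get_gene_region
-- ===== SOURCE A (Python) =====
-- def get_gene_region(list_gene_name, list_gene_position):
--     """
--     each V, D, J return the maximum region expanded by the genes
--     """
--     dict_region = {"V":[3000000000,0], "D":[3000000000,0], "J":[3000000000,0], "C":[3000000000,0]}
--     for idx, gene_name in enumerate(list_gene_name):
--         gene_class = gene_name[3]
--         if gene_class not in {"V", "D", "J"}:
--             gene_class = "C"
--         gene_region = list_gene_position[idx]
--         if dict_region[gene_class][0] > gene_region[0]:
--             dict_region[gene_class][0] = gene_region[0]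
--         if dict_region[gene_class][1] < gene_region[1]:
--             dict_region[gene_class][1] = gene_region[1]
--     return dict_region
-- ===== SOURCE B (Python) =====
-- def get_gene_region(list_gene_name, list_gene_position):
--     """
--     each V, D, J return the maximum region expanded by the genes
--     (group-then-reduce: bucket the position pairs per class, then take min/max)
--     """
--     groups = {"V": [], "D": [], "J": [], "C": []}
--     for gene_name, gene_region in zip(list_gene_name, list_gene_position):
--         cls = gene_name[3]
--         if cls not in ("V", "D", "J"):
--             cls = "C"
--         groups[cls].append(gene_region)
--     return {cls: [min([3000000000] + [p[0] for p in pairs]),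
--                   max([0] + [p[1] for p in pairs])]
--             for cls, pairs in groups.items()}
-- ===== Notes on version B (the rewrite author's own statement) =====
-- stated objective: alternative
-- what changed: Replaces the interleaved running-min/max dict mutation with a group-then-reduce structure: one pass buckets each position pair by gene class, a second pass computes each class's [min, max] with genuine min/max reductions seeded by the sentinels 3000000000 and 0.
import Mathlib
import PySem

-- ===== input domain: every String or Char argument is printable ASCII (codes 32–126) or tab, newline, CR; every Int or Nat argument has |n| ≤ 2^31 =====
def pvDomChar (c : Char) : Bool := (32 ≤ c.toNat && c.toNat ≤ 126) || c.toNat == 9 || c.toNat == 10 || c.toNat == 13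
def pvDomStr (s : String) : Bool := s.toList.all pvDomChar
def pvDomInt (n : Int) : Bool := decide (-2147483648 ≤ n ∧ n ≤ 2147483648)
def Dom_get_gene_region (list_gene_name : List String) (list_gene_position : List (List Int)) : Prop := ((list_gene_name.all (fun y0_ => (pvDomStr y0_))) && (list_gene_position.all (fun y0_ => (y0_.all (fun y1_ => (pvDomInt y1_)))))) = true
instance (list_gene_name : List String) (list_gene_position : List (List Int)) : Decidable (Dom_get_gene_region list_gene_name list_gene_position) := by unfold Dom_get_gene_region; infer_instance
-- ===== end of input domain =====

-- B replaces A's interleaved running-min/max dict mutation by group-then-reduce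
-- (bucket pairs per class, then min/max reductions seeded by the sentinels); objective: alternative.

-- ===== PORT A =====
-- one loop step of A (the full position list is indexed with the running enumerate index)
def pvStepA (ps : List (List Int)) (d : PySem.Dict String (List Int)) (p : Int × String) :
    PySem.Dict String (List Int) :=
  match PySem.Str.pyGet? p.2 3 with
  | none => d  -- gene_name[3] raises IndexError in Python; excluded by Pre_
  | some c =>
    let gc := String.ofList [c]
    let gene_class := if gc ∈ (["V", "D", "J"] : List String) then gc else "C"
    match PySem.List.pyGet? ps p.1 with
    | none => d  -- list_gene_position[idx] raises IndexError; excluded by Pre_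
    | some gene_region =>
      let lst := d.getD gene_class []
      let lst := if PySem.List.pyGetD lst 0 0 > PySem.List.pyGetD gene_region 0 0 then
        PySem.List.pySetD lst 0 (PySem.List.pyGetD gene_region 0 0) else lst
      let lst := if PySem.List.pyGetD lst 1 0 < PySem.List.pyGetD gene_region 1 0 then
        PySem.List.pySetD lst 1 (PySem.List.pyGetD gene_region 1 0) else lst
      d.insert gene_class lst

def get_gene_region (list_gene_name : List String) (list_gene_position : List (List Int)) :
    List (String × List Int) :=
  let dict_region : PySem.Dict String (List Int) :=
    PySem.Dict.mk [("V", [3000000000, 0]), ("D", [3000000000, 0]),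
                   ("J", [3000000000, 0]), ("C", [3000000000, 0])]
  ((PySem.List.enumerate list_gene_name 0).foldl (pvStepA list_gene_position) dict_region).items

-- ===== PORT B =====
-- one bucketing step of B (append the position pair to its class's bucket)
def pvStepB (g : PySem.Dict String (List (List Int))) (p : String × List Int) :
    PySem.Dict String (List (List Int)) :=
  match PySem.Str.pyGet? p.1 3 with
  | none => g  -- gene_name[3] raises IndexError in Python; excluded by Pre_
  | some c =>
    let cls := String.ofList [c]
    let cls := if cls ∈ (["V", "D", "J"] : List String) then cls else "C"
    g.insert cls (g.getD cls [] ++ [p.2])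

def get_gene_region_alt (list_gene_name : List String) (list_gene_position : List (List Int)) :
    List (String × List Int) :=
  let groups : PySem.Dict String (List (List Int)) :=
    PySem.Dict.mk [("V", []), ("D", []), ("J", []), ("C", [])]
  let groups := (list_gene_name.zip list_gene_position).foldl pvStepB groups
  groups.items.map (fun q =>
    (q.1, [(q.2.map (fun p => PySem.List.pyGetD p 0 0)).foldl min 3000000000,
           (q.2.map (fun p => PySem.List.pyGetD p 1 0)).foldl max 0]))

-- ===== PRECONDITION & SPEC =====
-- Pre_ is exactly the set where Python A returns: every gene name has at least 4 characters,
-- every processed index exists in list_gene_position, and each processed position list has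
-- at least 2 elements (otherwise A raises IndexError).
def Pre_get_gene_region (list_gene_name : List String) (list_gene_position : List (List Int)) : Prop :=
  list_gene_name.length ≤ list_gene_position.length ∧
  (∀ n ∈ list_gene_name, 4 ≤ n.toList.length) ∧
  (∀ p ∈ list_gene_position.take list_gene_name.length, 2 ≤ p.length)
instance (list_gene_name : List String) (list_gene_position : List (List Int)) : Decidable (Pre_get_gene_region list_gene_name list_gene_position) := by unfold Pre_get_gene_region; infer_instance

def pvWitness_get_gene_region : List String × List (List Int) :=
  (["IGHV1", "IGHD2", "IGHJ6", "IGHA1"], [[10, 20], [5, 15], [30, 40], [1, 2]])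

def Spec_get_gene_region (list_gene_name : List String) (list_gene_position : List (List Int)) (out : List (String × List Int)) : Prop := out = get_gene_region_alt list_gene_name list_gene_position
instance (list_gene_name : List String) (list_gene_position : List (List Int)) (out : List (String × List Int)) : Decidable (Spec_get_gene_region list_gene_name list_gene_position out) := by unfold Spec_get_gene_region; infer_instance

-- ===== CLAIM (what is proved, stated in full; the proofs are below) =====
def Claim_equal_get_gene_region : Prop := ∀ (list_gene_name : List String) (list_gene_position : List (List Int)), Dom_get_gene_region list_gene_name list_gene_position → Pre_get_gene_region list_gene_name list_gene_position → Spec_get_gene_region list_gene_name list_gene_position (get_gene_region list_gene_name list_gene_position)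

-- ===== LEMMAS AND PROOFS =====

-- A's loop step rewritten over a (name, region) pair instead of an index
def pvStepZ (d : PySem.Dict String (List Int)) (p : String × List Int) :
    PySem.Dict String (List Int) :=
  match PySem.Str.pyGet? p.1 3 with
  | none => d
  | some c =>
    let gc := String.ofList [c]
    let gene_class := if gc ∈ (["V", "D", "J"] : List String) then gc else "C"
    let lst := d.getD gene_class []
    let lst := if PySem.List.pyGetD lst 0 0 > PySem.List.pyGetD p.2 0 0 then
      PySem.List.pySetD lst 0 (PySem.List.pyGetD p.2 0 0) else lst
    let lst := if PySem.List.pyGetD lst 1 0 < PySem.List.pyGetD p.2 1 0 then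
      PySem.List.pySetD lst 1 (PySem.List.pyGetD p.2 1 0) else lst
    d.insert gene_class lst

-- the class key of a gene name, as B and A both compute it (none = name too short)
def pvCls (n : String) : Option String :=
  (PySem.Str.pyGet? n 3).map (fun c =>
    let gc := String.ofList [c]
    if gc ∈ (["V", "D", "J"] : List String) then gc else "C")

def pvMn (κ : String) (L : List (String × List Int)) (v : Int) : Int :=
  L.foldl (fun v p => if pvCls p.1 == some κ then min v (PySem.List.pyGetD p.2 0 0) else v) v

def pvMx (κ : String) (L : List (String × List Int)) (v : Int) : Int :=
  L.foldl (fun v p => if pvCls p.1 == some κ then max v (PySem.List.pyGetD p.2 1 0) else v) v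

def pvFilt (κ : String) (L : List (String × List Int)) : List (List Int) :=
  (L.filter (fun p => pvCls p.1 == some κ)).map (·.2)

lemma pvA_zip (ns : List String) (pre ps : List (List Int))
    (d : PySem.Dict String (List Int)) (h : ns.length ≤ ps.length) :
    (PySem.List.enumerate ns (pre.length : Int)).foldl (pvStepA (pre ++ ps)) d
      = (ns.zip ps).foldl pvStepZ d := by
  induction ns generalizing pre ps d with
  | nil => simp [PySem.List.enumerate_nil]
  | cons n ns ih =>
    cases ps with
    | nil => simp at h
    | cons r ps =>
      rw [PySem.List.enumerate_cons, List.zip_cons_cons, List.foldl_cons, List.foldl_cons]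
      have hstep : pvStepA (pre ++ r :: ps) d ((pre.length : Int), n) = pvStepZ d (n, r) := by
        simp [pvStepA, pvStepZ]
      rw [hstep]
      have hlen : (pre.length : Int) + 1 = (((pre ++ [r]).length : Nat) : Int) := by
        simp
      rw [hlen]
      have := ih (pre ++ [r]) ps (pvStepZ d (n, r)) (by simpa using h)
      simpa using this

lemma pvA_char (L : List (String × List Int)) (a1 a2 b1 b2 c1 c2 e1 e2 : Int) :
    L.foldl pvStepZ (PySem.Dict.mk [("V", [a1, a2]), ("D", [b1, b2]), ("J", [c1, c2]), ("C", [e1, e2])])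
      = PySem.Dict.mk [("V", [pvMn "V" L a1, pvMx "V" L a2]),
                       ("D", [pvMn "D" L b1, pvMx "D" L b2]),
                       ("J", [pvMn "J" L c1, pvMx "J" L c2]),
                       ("C", [pvMn "C" L e1, pvMx "C" L e2])] := by
  induction L generalizing a1 a2 b1 b2 c1 c2 e1 e2 with
  | nil => simp [pvMn, pvMx]
  | cons p L ih =>
    rw [List.foldl_cons]
    match hc : PySem.Str.pyGet? p.1 3 with
    | none =>
      have hcl := hc
      simp only [PySem.Str.pyGet?, PySem.Chars.pyGet?] at hcl
      have hstep : pvStepZ (PySem.Dict.mk [("V", [a1, a2]), ("D", [b1, b2]), ("J", [c1, c2]), ("C", [e1, e2])]) p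
          = PySem.Dict.mk [("V", [a1, a2]), ("D", [b1, b2]), ("J", [c1, c2]), ("C", [e1, e2])] := by
        simp only [pvStepZ]
        rw [hc]
      rw [hstep, ih]
      simp [pvMn, pvMx, pvCls, hcl]
    | some c =>
      have hcl := hc
      simp only [PySem.Str.pyGet?, PySem.Chars.pyGet?] at hcl
      by_cases hV : String.ofList [c] = "V"
      · have hstep : pvStepZ (PySem.Dict.mk [("V", [a1, a2]), ("D", [b1, b2]), ("J", [c1, c2]), ("C", [e1, e2])]) p
            = PySem.Dict.mk [("V", [min a1 (PySem.List.pyGetD p.2 0 0), max a2 (PySem.List.pyGetD p.2 1 0)]),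
                             ("D", [b1, b2]), ("J", [c1, c2]), ("C", [e1, e2])] := by
          simp only [pvStepZ]
          rw [hc]
          simp only [hV]
          generalize PySem.List.pyGetD p.2 (0 : Int) 0 = r0
          generalize PySem.List.pyGetD p.2 (1 : Int) 0 = r1
          simp [PySem.Dict.getD, PySem.Dict.get?_mk_cons, PySem.Dict.insert,
                PySem.List.pySetD, PySem.List.pySet?, PySem.List.pyIdx?,
                PySem.List.pyGetD, PySem.List.pyGet?]
          split_ifs <;> simp_all [min_def, max_def] <;> omega
        rw [hstep, ih]
        simp [pvMn, pvMx, pvCls, hcl, hV]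
      · by_cases hD : String.ofList [c] = "D"
        · have hstep : pvStepZ (PySem.Dict.mk [("V", [a1, a2]), ("D", [b1, b2]), ("J", [c1, c2]), ("C", [e1, e2])]) p
              = PySem.Dict.mk [("V", [a1, a2]),
                               ("D", [min b1 (PySem.List.pyGetD p.2 0 0), max b2 (PySem.List.pyGetD p.2 1 0)]),
                               ("J", [c1, c2]), ("C", [e1, e2])] := by
            simp only [pvStepZ]
            rw [hc]
            simp only [hD]
            generalize PySem.List.pyGetD p.2 (0 : Int) 0 = r0
            generalize PySem.List.pyGetD p.2 (1 : Int) 0 = r1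
            simp [PySem.Dict.getD, PySem.Dict.get?_mk_cons, PySem.Dict.insert,
                  PySem.List.pySetD, PySem.List.pySet?, PySem.List.pyIdx?,
                  PySem.List.pyGetD, PySem.List.pyGet?]
            split_ifs <;> simp_all [min_def, max_def] <;> omega
          rw [hstep, ih]
          simp [pvMn, pvMx, pvCls, hcl, hD]
        · by_cases hJ : String.ofList [c] = "J"
          · have hstep : pvStepZ (PySem.Dict.mk [("V", [a1, a2]), ("D", [b1, b2]), ("J", [c1, c2]), ("C", [e1, e2])]) p
                = PySem.Dict.mk [("V", [a1, a2]), ("D", [b1, b2]),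
                                 ("J", [min c1 (PySem.List.pyGetD p.2 0 0), max c2 (PySem.List.pyGetD p.2 1 0)]),
                                 ("C", [e1, e2])] := by
              simp only [pvStepZ]
              rw [hc]
              simp only [hJ]
              generalize PySem.List.pyGetD p.2 (0 : Int) 0 = r0
              generalize PySem.List.pyGetD p.2 (1 : Int) 0 = r1
              simp [PySem.Dict.getD, PySem.Dict.get?_mk_cons, PySem.Dict.insert,
                    PySem.List.pySetD, PySem.List.pySet?, PySem.List.pyIdx?,
                    PySem.List.pyGetD, PySem.List.pyGet?]
              split_ifs <;> simp_all [min_def, max_def] <;> omega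
            rw [hstep, ih]
            simp [pvMn, pvMx, pvCls, hcl, hJ]
          · have hstep : pvStepZ (PySem.Dict.mk [("V", [a1, a2]), ("D", [b1, b2]), ("J", [c1, c2]), ("C", [e1, e2])]) p
                = PySem.Dict.mk [("V", [a1, a2]), ("D", [b1, b2]), ("J", [c1, c2]),
                                 ("C", [min e1 (PySem.List.pyGetD p.2 0 0), max e2 (PySem.List.pyGetD p.2 1 0)])] := by
              simp only [pvStepZ]
              rw [hc]
              generalize PySem.List.pyGetD p.2 (0 : Int) 0 = r0
              generalize PySem.List.pyGetD p.2 (1 : Int) 0 = r1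
              simp [hV, hD, hJ, PySem.Dict.getD, PySem.Dict.get?_mk_cons, PySem.Dict.insert,
                    PySem.List.pySetD, PySem.List.pySet?, PySem.List.pyIdx?,
                    PySem.List.pyGetD, PySem.List.pyGet?]
              split_ifs <;> simp_all [min_def, max_def] <;> omega
            rw [hstep, ih]
            simp [pvMn, pvMx, pvCls, hcl, hV, hD, hJ]

lemma pvB_char (L : List (String × List Int)) (gV gD gJ gC : List (List Int)) :
    L.foldl pvStepB (PySem.Dict.mk [("V", gV), ("D", gD), ("J", gJ), ("C", gC)])
      = PySem.Dict.mk [("V", gV ++ pvFilt "V" L), ("D", gD ++ pvFilt "D" L),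
                       ("J", gJ ++ pvFilt "J" L), ("C", gC ++ pvFilt "C" L)] := by
  induction L generalizing gV gD gJ gC with
  | nil => simp [pvFilt]
  | cons p L ih =>
    rw [List.foldl_cons]
    match hc : PySem.Str.pyGet? p.1 3 with
    | none =>
      simp only [PySem.Str.pyGet?, PySem.Chars.pyGet?] at hc
      have hstep : pvStepB (PySem.Dict.mk [("V", gV), ("D", gD), ("J", gJ), ("C", gC)]) p
          = PySem.Dict.mk [("V", gV), ("D", gD), ("J", gJ), ("C", gC)] := by
        simp [pvStepB, hc]
      rw [hstep, ih]
      simp [pvFilt, pvCls, hc]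
    | some c =>
      simp only [PySem.Str.pyGet?, PySem.Chars.pyGet?] at hc
      by_cases hV : String.ofList [c] = "V"
      · have hstep : pvStepB (PySem.Dict.mk [("V", gV), ("D", gD), ("J", gJ), ("C", gC)]) p
            = PySem.Dict.mk [("V", gV ++ [p.2]), ("D", gD), ("J", gJ), ("C", gC)] := by
          simp [pvStepB, hc, hV, PySem.Dict.getD, PySem.Dict.get?_mk_cons, PySem.Dict.insert]
        rw [hstep, ih]
        simp [pvFilt, pvCls, hc, hV]
      · by_cases hD : String.ofList [c] = "D"
        · have hstep : pvStepB (PySem.Dict.mk [("V", gV), ("D", gD), ("J", gJ), ("C", gC)]) p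
              = PySem.Dict.mk [("V", gV), ("D", gD ++ [p.2]), ("J", gJ), ("C", gC)] := by
            simp [pvStepB, hc, hD, PySem.Dict.getD, PySem.Dict.get?_mk_cons, PySem.Dict.insert]
          rw [hstep, ih]
          simp [pvFilt, pvCls, hc, hD]
        · by_cases hJ : String.ofList [c] = "J"
          · have hstep : pvStepB (PySem.Dict.mk [("V", gV), ("D", gD), ("J", gJ), ("C", gC)]) p
                = PySem.Dict.mk [("V", gV), ("D", gD), ("J", gJ ++ [p.2]), ("C", gC)] := by
              simp [pvStepB, hc, hJ, PySem.Dict.getD, PySem.Dict.get?_mk_cons, PySem.Dict.insert]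
            rw [hstep, ih]
            simp [pvFilt, pvCls, hc, hJ]
          · have hstep : pvStepB (PySem.Dict.mk [("V", gV), ("D", gD), ("J", gJ), ("C", gC)]) p
                = PySem.Dict.mk [("V", gV), ("D", gD), ("J", gJ), ("C", gC ++ [p.2])] := by
              simp [pvStepB, hc, hV, hD, hJ, PySem.Dict.getD, PySem.Dict.get?_mk_cons, PySem.Dict.insert]
            rw [hstep, ih]
            simp [pvFilt, pvCls, hc, hV, hD, hJ]

lemma pvMinFilt (κ : String) (L : List (String × List Int)) (v : Int) :
    ((pvFilt κ L).map (fun p => PySem.List.pyGetD p 0 0)).foldl min v = pvMn κ L v := by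
  unfold pvFilt pvMn
  rw [List.map_map, List.foldl_map, List.foldl_filter]
  simp [Function.comp]

lemma pvMaxFilt (κ : String) (L : List (String × List Int)) (v : Int) :
    ((pvFilt κ L).map (fun p => PySem.List.pyGetD p 1 0)).foldl max v = pvMx κ L v := by
  unfold pvFilt pvMx
  rw [List.map_map, List.foldl_map, List.foldl_filter]
  simp [Function.comp]

-- ===== VERDICT (by name: the statement is the Claim_ definition above) =====
theorem get_gene_region_spec : Claim_equal_get_gene_region := by
  intro ns ps _ hpre
  unfold Spec_get_gene_region
  have hA : get_gene_region ns ps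
      = ((PySem.List.enumerate ns 0).foldl (pvStepA ps)
          (PySem.Dict.mk [("V", [3000000000, 0]), ("D", [3000000000, 0]),
                          ("J", [3000000000, 0]), ("C", [3000000000, 0])])).items := rfl
  have hB : get_gene_region_alt ns ps
      = (((ns.zip ps).foldl pvStepB
            (PySem.Dict.mk [("V", []), ("D", []), ("J", []), ("C", [])])).items.map (fun q =>
          (q.1, [(q.2.map (fun p => PySem.List.pyGetD p 0 0)).foldl min 3000000000,
                 (q.2.map (fun p => PySem.List.pyGetD p 1 0)).foldl max 0]))) := rfl
  have hz := pvA_zip ns [] ps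
    (PySem.Dict.mk [("V", [3000000000, 0]), ("D", [3000000000, 0]),
                    ("J", [3000000000, 0]), ("C", [3000000000, 0])]) hpre.1
  simp only [List.nil_append, List.length_nil, Nat.cast_zero] at hz
  rw [hA, hB, hz, pvA_char, pvB_char]
  simp only [List.nil_append, List.map_cons, List.map_nil]
  simp [pvMinFilt, pvMaxFilt]
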